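-- pv_equiv track=rewrite | github.com/dannxdev/code-playground | python/exercises/university-problems/2026/16-01/fase-02/01-exercise/app_data.py | validar_input
-- ===== SOURCE A (Python) =====
-- def validar_input(texto):
--     """
--     Valida que una entrada de usuario sea un texto valido.
--     """
--     # Verificar que el texto sea una cadena de texto válida:
--     if not isinstance(texto, str):
--         return False
--     # Verificar que no esté vacía
--     if len(texto) == 0:
--         return False
--     # Eliminar todos los tipos de espacios en blanco (espacios, tabs, saltos de línea, espacios Unicode)
--     texto_limpio = texto.strip()
--     # Verificar que después de eliminar espacios al inicio y final, aún tenga contenido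
--     if len(texto_limpio) == 0:
--         return False
--     # Verificar que NO contenga ningún espacio en blanco en el texto
--     for char in texto_limpio:
--         if char.isspace():
--             return False
--     # Si pasó todas las validaciones, la entrada es válida
--     return True
-- ===== SOURCE B (Python) =====
-- def validar_input(texto):
--     """
--     Valida que una entrada de usuario sea un texto valido.
--     """
--     if not isinstance(texto, str):
--         return False
--     # A single non-whitespace run <=> exactly one whitespace-token.
--     return len(texto.strip().split()) == 1
-- ===== Notes on version B (the rewrite author's own statement) =====
-- stated objective: simpler
-- what changed: Replaces the empty-check plus explicit character-by-character isspace scan of the stripped text with a single tokenization: texto.strip().split() yields exactly one token iff the text has exactly one non-whitespace run.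
import Mathlib
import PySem

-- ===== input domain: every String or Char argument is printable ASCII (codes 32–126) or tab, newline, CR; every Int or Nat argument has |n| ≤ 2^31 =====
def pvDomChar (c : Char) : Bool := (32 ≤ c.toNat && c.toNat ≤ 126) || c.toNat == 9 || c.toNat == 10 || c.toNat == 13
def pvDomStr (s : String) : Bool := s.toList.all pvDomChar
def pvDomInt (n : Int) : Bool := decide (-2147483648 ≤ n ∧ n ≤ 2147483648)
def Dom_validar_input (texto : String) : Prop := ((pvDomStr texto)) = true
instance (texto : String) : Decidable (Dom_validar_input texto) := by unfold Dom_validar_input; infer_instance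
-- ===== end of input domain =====

-- B replaces A's empty-checks + per-character isspace scan with one tokenization of the stripped text (simpler).

-- ===== PORT A =====
-- the 'for char in texto_limpio: if char.isspace(): return False' loop
def validarA_loop : List Char → Bool
  | [] => true
  | c :: rest => if PySem.Chars.isspace c then false else validarA_loop rest

def validar_input (texto : String) : Bool :=
  if PySem.Str.len texto == 0 then false
  else
    let texto_limpio := PySem.Str.strip texto
    if PySem.Str.len texto_limpio == 0 then false
    else validarA_loop texto_limpio.toList

-- ===== PORT B =====
def validar_input_alt (texto : String) : Bool :=
  (PySem.Str.split₀ (PySem.Str.strip texto)).length == 1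

-- ===== PRECONDITION & SPEC =====
def Spec_validar_input (texto : String) (out : Bool) : Prop := out = validar_input_alt texto
instance (texto : String) (out : Bool) : Decidable (Spec_validar_input texto out) := by unfold Spec_validar_input; infer_instance

-- ===== CLAIM (what is proved, stated in full; the proofs are below) =====
def Claim_equal_validar_input : Prop := ∀ (texto : String), Dom_validar_input texto → Spec_validar_input texto (validar_input texto)

-- ===== LEMMAS AND PROOFS =====

theorem go_mono (u : List Char) (cur : List Char) (acc : List (List Char)) :
    acc.length ≤ (PySem.Chars.split₀.go u cur acc).length := by
  induction u generalizing cur acc with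
  | nil =>
    simp only [PySem.Chars.split₀.go]
    split <;> simp
  | cons c rest ih =>
    simp only [PySem.Chars.split₀.go]
    split
    · split
      · exact ih _ _
      · calc acc.length ≤ (cur.reverse :: acc).length := by simp
          _ ≤ _ := ih _ _
    · exact ih _ _

theorem go_cur_ne (u : List Char) (cur : List Char) (acc : List (List Char))
    (h : cur ≠ []) : acc.length + 1 ≤ (PySem.Chars.split₀.go u cur acc).length := by
  induction u generalizing cur acc with
  | nil =>
    simp [PySem.Chars.split₀.go, List.isEmpty_iff, h]
  | cons c rest ih =>
    simp only [PySem.Chars.split₀.go]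
    split
    · rw [if_neg (by simp [List.isEmpty_iff, h])]
      calc acc.length + 1 = (cur.reverse :: acc).length := by simp
        _ ≤ _ := go_mono _ _ _
    · exact ih _ _ (by simp)

theorem go_has_word (u : List Char) (cur : List Char) (acc : List (List Char))
    (h : ∃ x ∈ u, PySem.Chars.isspace x = false) :
    acc.length + 1 ≤ (PySem.Chars.split₀.go u cur acc).length := by
  induction u generalizing cur acc with
  | nil => simp at h
  | cons c rest ih =>
    simp only [PySem.Chars.split₀.go]
    by_cases hc : PySem.Chars.isspace c = true
    · rw [if_pos hc]
      obtain ⟨x, hx, hxs⟩ := h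
      have hxr : x ∈ rest := by
        rcases List.mem_cons.mp hx with h1 | h1
        · subst h1; rw [hc] at hxs; cases hxs
        · exact h1
      split
      · exact ih _ _ ⟨x, hxr, hxs⟩
      · calc acc.length + 1 ≤ (cur.reverse :: acc).length + 1 := by simp
          _ ≤ _ := ih _ _ ⟨x, hxr, hxs⟩
    · rw [if_neg hc]
      exact go_cur_ne _ _ _ (by simp)

theorem go_consume (r : List Char) (u : List Char) (cur : List Char) (acc : List (List Char))
    (h : ∀ x ∈ r, PySem.Chars.isspace x = false) :
    PySem.Chars.split₀.go (r ++ u) cur acc = PySem.Chars.split₀.go u (r.reverse ++ cur) acc := by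
  induction r generalizing cur with
  | nil => simp
  | cons c rest ih =>
    have hc : PySem.Chars.isspace c = false := h c (by simp)
    simp only [List.cons_append, PySem.Chars.split₀.go, hc]
    simp only [List.reverse_cons, List.append_assoc, List.singleton_append]
    exact ih (c :: cur) (fun x hx => h x (List.mem_cons_of_mem _ hx))

theorem loop_eq_all (l : List Char) :
    validarA_loop l = l.all (fun c => !PySem.Chars.isspace c) := by
  induction l with
  | nil => rfl
  | cons c rest ih =>
    simp only [validarA_loop, List.all_cons, ih]
    by_cases hc : PySem.Chars.isspace c = true <;> simp [hc]

theorem dropWhile_cons_head {p : Char → Bool} {l : List Char} {c : Char} {d : List Char}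
    (h : List.dropWhile p l = c :: d) : p c = false := by
  induction l with
  | nil => simp at h
  | cons a l ih =>
    rw [List.dropWhile_cons] at h
    split at h
    · exact ih h
    · next hpa => injection h with h1 _; subst h1; simpa using hpa

theorem strip_cons_head (cs : List Char) (c : Char) (rest : List Char)
    (h : PySem.Chars.strip cs = c :: rest) : PySem.Chars.isspace c = false := by
  have hpre : PySem.Chars.strip cs <+: PySem.Chars.lstrip cs := by
    unfold PySem.Chars.strip PySem.Chars.rstrip
    refine ⟨((PySem.Chars.lstrip cs).reverse.takeWhile PySem.Chars.isspace).reverse, ?_⟩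
    rw [← List.reverse_append, List.takeWhile_append_dropWhile, List.reverse_reverse]
  obtain ⟨tail, htail⟩ := hpre
  rw [h] at htail
  unfold PySem.Chars.lstrip at htail
  exact dropWhile_cons_head htail.symm

theorem strip_getLast? (cs : List Char) (x : Char)
    (h : (PySem.Chars.strip cs).getLast? = some x) : PySem.Chars.isspace x = false := by
  unfold PySem.Chars.strip PySem.Chars.rstrip at h
  rw [List.getLast?_reverse] at h
  cases hdw : List.dropWhile PySem.Chars.isspace (PySem.Chars.lstrip cs).reverse with
  | nil => rw [hdw] at h; simp at h
  | cons a l =>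
    rw [hdw] at h
    simp only [List.head?_cons, Option.some.injEq] at h
    subst h
    exact dropWhile_cons_head hdw

-- the whole equivalence for a stripped text t (non-space ends)
theorem key_core (t : List Char)
    (hhead : ∀ c rest, t = c :: rest → PySem.Chars.isspace c = false)
    (hlast : ∀ x, t.getLast? = some x → PySem.Chars.isspace x = false) :
    (if t.length = 0 then false else validarA_loop t)
    = ((PySem.Chars.split₀ t).length == 1) := by
  cases t with
  | nil => simp [PySem.Chars.split₀, PySem.Chars.split₀.go]
  | cons c₀ t0 =>
    rw [if_neg (by simp)]
    set t := c₀ :: t0 with ht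
    have htne : t ≠ [] := by simp [ht]
    rw [loop_eq_all]
    by_cases hall : t.all (fun c => !PySem.Chars.isspace c) = true
    · -- all non-space: exactly one token
      rw [hall]
      have hq : ∀ x ∈ t, PySem.Chars.isspace x = false := by
        intro x hx
        simpa using List.all_eq_true.mp hall x hx
      have h1 : PySem.Chars.split₀ t = [t] := by
        unfold PySem.Chars.split₀
        have h2 := go_consume t [] [] [] hq
        simp only [List.append_nil] at h2
        rw [h2]
        simp [PySem.Chars.split₀.go, List.isEmpty_iff, htne]
      rw [h1]; rfl
    · -- a space inside: at least two tokens
      rw [Bool.eq_false_iff.mpr hall]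
      have hsp : ∃ x ∈ t, PySem.Chars.isspace x = true := by
        by_contra hno
        push_neg at hno
        exact hall (List.all_eq_true.mpr (fun x hx => by
          cases hxs : PySem.Chars.isspace x
          · simp
          · exact absurd hxs (hno x hx)))
      have hdecomp : t.takeWhile (fun c => !PySem.Chars.isspace c)
          ++ t.dropWhile (fun c => !PySem.Chars.isspace c) = t :=
        List.takeWhile_append_dropWhile
      have hc0 : PySem.Chars.isspace c₀ = false := hhead c₀ t0 rfl
      -- r is a nonempty cons
      have hr : t.takeWhile (fun c => !PySem.Chars.isspace c)
          = c₀ :: t0.takeWhile (fun c => !PySem.Chars.isspace c) := by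
        rw [ht, List.takeWhile_cons, if_pos (by simp [hc0])]
      have hrall : ∀ x ∈ t.takeWhile (fun c => !PySem.Chars.isspace c),
          PySem.Chars.isspace x = false := by
        intro x hx
        simpa using List.mem_takeWhile_imp hx
      -- d is a nonempty cons headed by a space
      have hdne : t.dropWhile (fun c => !PySem.Chars.isspace c) ≠ [] := by
        intro hdnil
        obtain ⟨x, hx, hxs⟩ := hsp
        rw [← hdecomp, hdnil, List.append_nil] at hx
        rw [hrall x hx] at hxs; cases hxs
      obtain ⟨c, d', hcd⟩ := List.exists_cons_of_ne_nil hdne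
      have hc : PySem.Chars.isspace c = true := by
        have := dropWhile_cons_head hcd
        simpa using this
      -- the last char of t is non-space, so d' is nonempty and holds a non-space char
      have hd'ne : d' ≠ [] := by
        intro hnil
        have hlt : t.getLast? = some c := by
          conv_lhs => rw [← hdecomp, hcd, hnil]
          simp
        rw [hlast c hlt] at hc; cases hc
      rcases List.eq_nil_or_concat d' with hnil | ⟨init, b, hb⟩
      · exact absurd hnil hd'ne
      have hbmem : b ∈ d' := by rw [hb]; simp
      have hbns : PySem.Chars.isspace b = false := by
        apply hlast
        conv_lhs => rw [← hdecomp, hcd, hb]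
        rw [show (t.takeWhile (fun c => !PySem.Chars.isspace c) ++ c :: init.concat b)
             = (t.takeWhile (fun c => !PySem.Chars.isspace c) ++ c :: init).concat b by simp]
        rw [List.concat_eq_append, List.getLast?_concat]
      -- count tokens
      have hge : 2 ≤ (PySem.Chars.split₀ t).length := by
        unfold PySem.Chars.split₀
        conv_rhs => rw [← hdecomp, hcd]
        rw [go_consume _ (c :: d') [] [] hrall]
        simp only [PySem.Chars.split₀.go, hc, if_pos, List.append_nil]
        rw [if_neg (by simp [List.isEmpty_iff, hr])]
        have h3 := go_has_word d' [] [(t.takeWhile (fun c => !PySem.Chars.isspace c)).reverse.reverse]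
          ⟨b, hbmem, hbns⟩
        simpa using h3
      have hne1 : (PySem.Chars.split₀ t).length ≠ 1 := by omega
      simp [hne1]

-- the equivalence on the List Char side, for any text
theorem key_list (cs : List Char) :
    (if cs.length = 0 then false
     else if (PySem.Chars.strip cs).length = 0 then false
     else validarA_loop (PySem.Chars.strip cs))
    = ((PySem.Chars.split₀ (PySem.Chars.strip cs)).length == 1) := by
  by_cases hcs : cs.length = 0
  · have h0 : cs = [] := List.length_eq_zero_iff.mp hcs
    subst h0
    simp [PySem.Chars.strip, PySem.Chars.lstrip, PySem.Chars.rstrip,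
      PySem.Chars.split₀, PySem.Chars.split₀.go]
  · rw [if_neg hcs]
    by_cases htn : (PySem.Chars.strip cs).length = 0
    · rw [if_pos htn]
      rw [List.length_eq_zero_iff.mp htn]
      simp [PySem.Chars.split₀, PySem.Chars.split₀.go]
    · rw [if_neg htn]
      have h := key_core (PySem.Chars.strip cs) (strip_cons_head cs) (strip_getLast? cs)
      rw [if_neg htn] at h
      exact h

-- ===== VERDICT (by name: the statement is the Claim_ definition above) =====
theorem validar_input_spec : Claim_equal_validar_input := by
  intro texto _
  unfold Spec_validar_input validar_input validar_input_alt
  have hsplit : (PySem.Str.split₀ (PySem.Str.strip texto)).length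
      = (PySem.Chars.split₀ (PySem.Chars.strip texto.toList)).length := by
    calc (PySem.Str.split₀ (PySem.Str.strip texto)).length
        = (List.map String.toList (PySem.Str.split₀ (PySem.Str.strip texto))).length := by
          rw [List.length_map]
      _ = (PySem.Chars.split₀ (PySem.Str.strip texto).toList).length := by
          rw [PySem.Str.split₀_map_toList]
      _ = _ := by rw [PySem.Str.toList_strip]
  simp only [PySem.Str.len_eq, PySem.Str.toList_strip, hsplit, beq_iff_eq, Nat.cast_eq_zero]
  simpa using key_list texto.toList
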